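-- pv_equiv track=rewrite | github.com/prakashbokarvadiya/Data-Science-Assignments | Module2_Python_Assignments/Practical_Tasks/task8_sublist_check.py | contains_sublist
-- ===== SOURCE A (Python) =====
-- def contains_sublist(main_list, sub_list):
--     """Check if sub_list is a contiguous sublist of main_list."""
--     if not sub_list:
--         return True  # Empty list is always a sublist
--     if len(sub_list) > len(main_list):
--         return False
--
--     sub_len = len(sub_list)
--     for i in range(len(main_list) - sub_len + 1):
--         if main_list[i:i + sub_len] == sub_list:
--             return True
--     return False
-- ===== SOURCE B (Python) =====
-- def contains_sublist(main_list, sub_list):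
--     """Check if sub_list is a contiguous sublist of main_list.
--
--     Rolling-sum (Rabin-Karp-style) filter: maintain the sum of the current
--     window across shifts and compare the window itself only when the sums
--     agree; an equal window always has an equal sum, so the result is exact."""
--     m = len(sub_list)
--     n = len(main_list)
--     if m == 0:
--         return True
--     if m > n:
--         return False
--     target = sum(sub_list)
--     window = sum(main_list[:m])
--     for i in range(n - m + 1):
--         if window == target and main_list[i:i + m] == sub_list:
--             return True
--         if i + m < n:
--             window += main_list[i + m] - main_list[i]
--     return False
-- ===== Notes on version B (the rewrite author's own statement) =====
-- stated objective: alternative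
-- what changed: Replaces the slice-compare-at-every-offset scan with a Rabin-Karp-style rolling window sum maintained per shift, comparing the actual window only at offsets whose sum matches the pattern's sum.
import Mathlib
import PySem

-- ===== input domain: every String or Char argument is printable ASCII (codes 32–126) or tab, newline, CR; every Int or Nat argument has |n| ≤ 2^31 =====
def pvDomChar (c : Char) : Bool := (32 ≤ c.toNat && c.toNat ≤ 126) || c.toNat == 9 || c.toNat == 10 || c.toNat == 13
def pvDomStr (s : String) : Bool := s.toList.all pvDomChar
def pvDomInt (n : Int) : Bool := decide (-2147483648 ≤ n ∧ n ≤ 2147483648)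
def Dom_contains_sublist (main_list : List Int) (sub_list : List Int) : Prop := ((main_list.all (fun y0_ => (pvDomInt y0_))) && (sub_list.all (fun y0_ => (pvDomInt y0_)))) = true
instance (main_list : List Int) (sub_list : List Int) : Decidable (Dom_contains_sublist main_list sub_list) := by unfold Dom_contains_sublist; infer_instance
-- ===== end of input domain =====

-- B replaces A's slice-compare-at-every-offset scan by a rolling window sum
-- (Rabin-Karp-style filter): the window is compared only where its sum matches the pattern's sum.

-- ===== PORT A =====
def contains_sublist (main_list : List Int) (sub_list : List Int) : Bool :=
  if sub_list.isEmpty then true          -- if not sub_list: return True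
  else if (sub_list.length : Int) > (main_list.length : Int) then false
  else
    let sub_len : Int := sub_list.length
    -- for i in range(len(main_list) - sub_len + 1): if main_list[i:i+sub_len] == sub_list: return True
    (PySem.List.pyRange 0 ((main_list.length : Int) - sub_len + 1) 1).any
      (fun i => PySem.List.slice main_list (some i) (some (i + sub_len)) == sub_list)

-- ===== PORT B =====
-- the 'for i in range(n-m+1)' loop of Source B, carrying the rolling window sum;
-- main_list[i+m] / main_list[i] are in range under the 'i + m < n' guard, so pyGetD is exact there
def altLoop (main_list sub_list : List Int) (m n target : Int) : List Int → Int → Bool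
  | [], _ => false
  | i :: rest, window =>
    if window == target && (PySem.List.slice main_list (some i) (some (i + m)) == sub_list) then
      true
    else
      altLoop main_list sub_list m n target rest
        (if i + m < n then
           window + PySem.List.pyGetD main_list (i + m) 0 - PySem.List.pyGetD main_list i 0
         else window)

def contains_sublist_alt (main_list : List Int) (sub_list : List Int) : Bool :=
  let m : Int := sub_list.length
  let n : Int := main_list.length
  if sub_list.isEmpty then true
  else if m > n then false
  else
    let target : Int := sub_list.sum
    let window : Int := (PySem.List.slice main_list none (some m)).sum   -- sum(main_list[:m])
    altLoop main_list sub_list m n target (PySem.List.pyRange 0 (n - m + 1) 1) window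

-- ===== PRECONDITION & SPEC =====
def Spec_contains_sublist (main_list : List Int) (sub_list : List Int) (out : Bool) : Prop := out = contains_sublist_alt main_list sub_list
instance (main_list : List Int) (sub_list : List Int) (out : Bool) : Decidable (Spec_contains_sublist main_list sub_list out) := by unfold Spec_contains_sublist; infer_instance

-- ===== CLAIM (what is proved, stated in full; the proofs are below) =====
def Claim_equal_contains_sublist : Prop := ∀ (main_list : List Int) (sub_list : List Int), Dom_contains_sublist main_list sub_list → Spec_contains_sublist main_list sub_list (contains_sublist main_list sub_list)

-- ===== LEMMAS AND PROOFS =====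

-- shifting the window one step right changes its sum by the entering minus the leaving element
lemma sum_window_shift (l : List Int) (i m : Nat) (h : i + m < l.length) :
    ((l.drop (i+1)).take m).sum
      = ((l.drop i).take m).sum + l.getD (i+m) 0 - l.getD i 0 := by
  cases m with
  | zero => simp
  | succ k =>
    have hi : i < l.length := by omega
    have hdrop : l.drop i = l[i] :: l.drop (i+1) := List.drop_eq_getElem_cons hi
    have hlen : k < (l.drop (i+1)).length := by simp; omega
    have htake : (l.drop (i+1)).take (k+1)
        = (l.drop (i+1)).take k ++ [(l.drop (i+1))[k]] := by
      rw [List.take_add_one]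
      simp [List.getElem?_eq_getElem hlen]
    have hrhs : (l.drop i).take (k+1) = l[i] :: (l.drop (i+1)).take k := by
      rw [hdrop, List.take_succ_cons]
    have hget : (l.drop (i+1))[k] = l[i+1+k]'(by omega) := List.getElem_drop ..
    rw [htake, hrhs, hget]
    have h1 : l.getD (i+(k+1)) 0 = l[i+1+k]'(by omega) := by
      rw [List.getD_eq_getElem?_getD, List.getElem?_eq_getElem (by omega : i+(k+1) < l.length)]
      simp only [Option.getD_some]
      congr 1
      omega
    have h2 : l.getD i 0 = l[i] := by
      rw [List.getD_eq_getElem?_getD, List.getElem?_eq_getElem hi]; rfl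
    rw [h1, h2]
    simp [List.sum_append, List.sum_cons]
    ring

-- B's loop returns true iff some window from i0 on equals sub_list, given the rolling-sum invariant
lemma altLoop_iff (l s : List Int) : ∀ (cnt : Nat) (i0 window : Int),
    0 ≤ i0 → i0 ≤ (l.length : Int) - s.length + 1 →
    cnt = (((l.length : Int) - s.length + 1) - i0).toNat →
    (i0 < (l.length : Int) - s.length + 1 →
      window = (PySem.List.slice l (some i0) (some (i0 + (s.length : Int)))).sum) →
    (altLoop l s s.length l.length s.sum
        (PySem.List.pyRange i0 ((l.length : Int) - s.length + 1) 1) window = true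
      ↔ ∃ i : Int, i0 ≤ i ∧ i < (l.length : Int) - s.length + 1 ∧
          PySem.List.slice l (some i) (some (i + (s.length : Int))) = s) := by
  intro cnt
  induction cnt with
  | zero =>
    intro i0 window h0 hK hcnt _
    have hKle : (l.length : Int) - s.length + 1 ≤ i0 := by omega
    rw [PySem.List.pyRange_one_eq_nil hKle]
    simp only [altLoop]
    constructor
    · intro h; exact absurd h (by simp)
    · rintro ⟨i, h1, h2, _⟩; omega
  | succ c ih =>
    intro i0 window h0 hK hcnt hw
    have hlt : i0 < (l.length : Int) - s.length + 1 := by omega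
    obtain ⟨j, hj⟩ : ∃ j : Nat, i0 = (j : Int) := ⟨i0.toNat, by omega⟩
    have hslice : PySem.List.slice l (some i0) (some (i0 + (s.length : Int)))
        = (l.drop j).take s.length := by
      rw [hj]; exact PySem.List.slice_natCast_add ..
    rw [PySem.List.pyRange_one_cons hlt]
    simp only [altLoop]
    by_cases hcase : (l.drop j).take s.length = s
    · have hwv : window = s.sum := by rw [hw hlt, hslice, hcase]
      rw [if_pos (by simp [hwv, hslice, hcase])]
      constructor
      · intro _; exact ⟨i0, le_refl _, hlt, by rw [hslice, hcase]⟩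
      · intro _; rfl
    · rw [if_neg (by simp [hslice, hcase])]
      rw [ih (i0+1) _ (by omega) (by omega) (by omega) ?_]
      · constructor
        · rintro ⟨i, h1, h2, h3⟩; exact ⟨i, by omega, h2, h3⟩
        · rintro ⟨i, h1, h2, h3⟩
          refine ⟨i, ?_, h2, h3⟩
          rcases eq_or_lt_of_le h1 with heq | hlt'
          · exfalso; apply hcase; rw [← hslice, heq]; exact h3
          · omega
      · -- the rolling-sum invariant at i0+1
        intro hlt2
        have hguard : i0 + (s.length : Int) < (l.length : Int) := by omega
        rw [if_pos hguard]
        have hjm : i0 + (s.length : Int) = ((j + s.length : Nat) : Int) := by push_cast; omega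
        have hj1 : i0 + 1 = ((j + 1 : Nat) : Int) := by omega
        have hslice1 : PySem.List.slice l (some (i0+1)) (some ((i0+1) + (s.length : Int)))
            = (l.drop (j+1)).take s.length := by
          rw [hj1]; exact PySem.List.slice_natCast_add ..
        rw [hslice1, hw hlt, hslice, hjm, hj, PySem.List.pyGetD_natCast, PySem.List.pyGetD_natCast]
        rw [sum_window_shift l j s.length (by omega)]

-- the two ports agree on every input
lemma ports_agree (main_list sub_list : List Int) :
    contains_sublist main_list sub_list = contains_sublist_alt main_list sub_list := by
  by_cases hs : sub_list.isEmpty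
  · simp [contains_sublist, contains_sublist_alt, hs]
  · by_cases hlen : (sub_list.length : Int) > (main_list.length : Int)
    · simp [contains_sublist, contains_sublist_alt, hs, hlen]
    · rw [contains_sublist, contains_sublist_alt]
      simp only [hs, hlen, Bool.false_eq_true, if_false]
      rw [Bool.eq_iff_iff]
      have h2 : PySem.List.slice main_list (some ((0:Nat):Int)) (some (((0:Nat):Int) + ((sub_list.length:Nat):Int)))
          = (main_list.drop 0).take sub_list.length := PySem.List.slice_natCast_add ..
      simp only [Nat.cast_zero, zero_add, List.drop_zero] at h2
      have hwin0 : (PySem.List.slice main_list none (some (sub_list.length : Int))).sum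
          = (PySem.List.slice main_list (some (0:Int)) (some ((0:Int) + (sub_list.length : Int)))).sum := by
        rw [PySem.List.slice_to_natCast, zero_add, h2]
      rw [altLoop_iff main_list sub_list (((main_list.length : Int) - sub_list.length + 1) - 0).toNat 0 _
        (le_refl 0) (by omega) rfl (fun _ => hwin0)]
      rw [List.any_eq_true]
      constructor
      · rintro ⟨i, hmem, hP⟩
        rw [PySem.List.mem_pyRange_one] at hmem
        exact ⟨i, hmem.1, by omega, by simpa using hP⟩
      · rintro ⟨i, h1, h2, h3⟩
        exact ⟨i, by rw [PySem.List.mem_pyRange_one]; omega, by simpa using h3⟩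

-- ===== VERDICT (by name: the statement is the Claim_ definition above) =====
theorem contains_sublist_spec : Claim_equal_contains_sublist := by
  intro main_list sub_list _
  exact ports_agree main_list sub_list
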